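-- pv_equiv track=rewrite | github.com/CASY82/CHH_StudyRoom | Algo/etcCode/test2204103.py | bfs
-- ===== SOURCE A (Python) =====
-- from collections import deque
--
-- def bfs(x, n, k):
--     que = deque()
--     que.append((x, x, 1))
--     cnt = 0
--
--     while que:
--         tx, location, jump = que.popleft()
--
--         if location == n and k == jump:
--             cnt += 1
--             continue
--
--         if jump < k:
--             for i in range(1, tx):
--                 if location + i <= n:
--                     que.append((i, location + i, jump + 1))
--
--     return cnt % 1000000007
-- ===== SOURCE B (Python) =====
-- def bfs(x, n, k):
--     # Top-down memoized count: ways(t, r, j) = number of strictly decreasing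
--     # sequences of j values from 1..t-1 summing to r (candidates above r pruned).
--     MOD = 1000000007
--     memo = {}
--
--     def ways(t, r, j):
--         if r == 0 and j == 0:
--             return 1
--         if j <= 0 or r < 0:
--             return 0
--         key = (t, r, j)
--         if key not in memo:
--             memo[key] = sum(ways(i, r - i, j - 1) for i in range(1, min(t, r + 1)))
--         return memo[key]
--
--     return ways(x, n - x, k - 1) % MOD
-- ===== Notes on version B (the rewrite author's own statement) =====
-- stated objective: alternative
-- what changed: A's breadth-first queue enumeration of every strictly decreasing sequence is replaced by a top-down memoized recursion on (value bound, remaining sum, remaining length) that prunes candidates above the remaining sum and shares repeated subproblems through a dict.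
import Mathlib
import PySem

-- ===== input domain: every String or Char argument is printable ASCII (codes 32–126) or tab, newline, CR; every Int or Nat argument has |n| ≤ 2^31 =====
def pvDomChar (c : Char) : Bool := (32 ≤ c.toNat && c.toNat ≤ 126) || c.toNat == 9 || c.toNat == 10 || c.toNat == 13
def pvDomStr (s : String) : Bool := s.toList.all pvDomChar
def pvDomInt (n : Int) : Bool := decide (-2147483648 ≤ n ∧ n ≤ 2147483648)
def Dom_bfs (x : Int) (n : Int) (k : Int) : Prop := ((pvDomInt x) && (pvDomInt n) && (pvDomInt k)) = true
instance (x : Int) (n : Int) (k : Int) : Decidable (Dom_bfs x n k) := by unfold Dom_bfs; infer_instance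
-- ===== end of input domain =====

-- B replaces A's breadth-first queue enumeration of all strictly decreasing
-- sequences by a top-down memoized recursion on (bound, remaining sum, remaining
-- length) with candidates above the remaining sum pruned (objective: alternative).

-- ===== PORT A =====
-- termination measure for the BFS queue: each popped state (tx, _, _) spawns
-- children with first component in 1..tx-1
def pvMu (e : Int × Int × Int) : Nat := 2 ^ (e.1 - 1).toNat

lemma pvPow2SumRange : ∀ T : ℕ, ((List.range T).map (fun u => (2:ℕ) ^ u)).sum = 2 ^ T - 1 := by
  intro T
  induction T with
  | zero => simp
  | succ T ih =>
    rw [List.range_succ, List.map_append, List.sum_append, ih]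
    have h1 : 1 ≤ (2:ℕ) ^ T := Nat.one_le_two_pow
    simp [pow_succ]
    omega

lemma pvSumFilterLe (l : List Int) (p : Int → Bool) (g : Int → ℕ) :
    (((l.filter p).map g).sum ≤ (l.map g).sum) := by
  induction l with
  | nil => simp
  | cons a l ih =>
    by_cases h : p a = true <;> simp [h] <;> omega

lemma pvChildrenLt (tx : Int) (p : Int → Bool) :
    ((((PySem.List.pyRange 1 tx 1).filter p).map (fun i => (2:ℕ) ^ (i - 1).toNat)).sum)
      < 2 ^ (tx - 1).toNat := by
  have hle := pvSumFilterLe (PySem.List.pyRange 1 tx 1) p (fun i => (2:ℕ) ^ (i - 1).toNat)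
  have hfull : ((PySem.List.pyRange 1 tx 1).map (fun i => (2:ℕ) ^ (i - 1).toNat)).sum
      = 2 ^ (tx - 1).toNat - 1 := by
    rw [PySem.List.pyRange_one, List.map_map]
    have : ((fun i => (2:ℕ) ^ (i - 1).toNat) ∘ fun k : ℕ => (1:ℤ) + k)
        = fun u : ℕ => (2:ℕ) ^ u := by
      funext u
      simp only [Function.comp]
      congr 1
      omega
    rw [this, pvPow2SumRange]
  have h1 : 1 ≤ (2:ℕ) ^ (tx - 1).toNat := Nat.one_le_two_pow
  omega

def bfsLoop (n k : Int) : List (Int × Int × Int) → Int → Int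
  | [], cnt => cnt
  | (tx, location, jump) :: que, cnt =>
    if location = n ∧ k = jump then
      bfsLoop n k que (cnt + 1)
    else if jump < k then
      bfsLoop n k
        ((PySem.List.pyRange 1 tx 1).foldl
          (fun q i => if location + i ≤ n then q ++ [(i, location + i, jump + 1)] else q) que)
        cnt
    else
      bfsLoop n k que cnt
  termination_by que _ => (que.map pvMu).sum
  decreasing_by
  · have h1 : 1 ≤ pvMu (tx, location, jump) := Nat.one_le_two_pow
    simp only [List.map_cons, List.sum_cons]
    omega
  · have hdite : (fun (q : List (ℤ × ℤ × ℤ)) (i : ℤ) =>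
        if _ : location + i ≤ n then q ++ [(i, location + i, jump + 1)] else q)
        = (fun q i => if location + i ≤ n then q ++ [(i, location + i, jump + 1)] else q) := by
      funext q i; rw [dite_eq_ite]
    rw [hdite, PySem.List.foldl_append_ite (p := fun i => location + i ≤ n)
        (f := fun i => (i, location + i, jump + 1))]
    simp only [List.map_cons, List.sum_cons, List.map_append, List.sum_append, List.map_map]
    have := pvChildrenLt tx (fun i => decide (location + i ≤ n))
    have hcomp : (pvMu ∘ fun i : ℤ => (i, location + i, jump + 1))
        = fun i : ℤ => (2:ℕ) ^ (i - 1).toNat := by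
      funext i; simp [pvMu]
    rw [hcomp]
    have h2 : pvMu (tx, location, jump) = 2 ^ (tx - 1).toNat := rfl
    omega
  · have h1 : 1 ≤ pvMu (tx, location, jump) := Nat.one_le_two_pow
    simp only [List.map_cons, List.sum_cons]
    omega

def bfs (x : Int) (n : Int) (k : Int) : Int :=
  PySem.Int.mod (bfsLoop n k [(x, x, 1)] 0) 1000000007

-- ===== PORT B =====
-- termination bound for the memoized recursion: 1 + max candidate value in the list
def pvMaxL (l : List Int) : Nat := l.foldr (fun i m => max (i.toNat + 1) m) 0

lemma pvMaxL_le (l : List Int) (b : Nat) (h : ∀ i ∈ l, i.toNat + 1 ≤ b) : pvMaxL l ≤ b := by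
  induction l with
  | nil => simp [pvMaxL]
  | cons a l ih =>
    have ha := h a (by simp)
    have hl := ih (fun i hi => h i (by simp [hi]))
    simp only [pvMaxL, List.foldr] at *
    omega

lemma le_pvMaxL (i : Int) (l : List Int) (h : i ∈ l) : i.toNat + 1 ≤ pvMaxL l := by
  induction l with
  | nil => simp at h
  | cons a l ih =>
    simp only [pvMaxL, List.foldr] at *
    rcases List.mem_cons.mp h with h | h
    · omega
    · have := ih h; omega

mutual
  -- sum(ways(i, r - i, j - 1) for i in l), threading the memo dict left to right
  def bfs_altSum (r j : Int) (l : List Int)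
      (memo : PySem.Dict (Int × Int × Int) Int) :
      Int × PySem.Dict (Int × Int × Int) Int :=
    match l with
    | [] => (0, memo)
    | i :: rest =>
      let p1 := bfs_altWays i (r - i) (j - 1) memo
      let p2 := bfs_altSum r j rest p1.2
      (p1.1 + p2.1, p2.2)
  termination_by (pvMaxL l, 1, l.length)
  decreasing_by
  · have h1 : i.toNat + 1 ≤ pvMaxL (i :: rest) := le_pvMaxL i _ (by simp)
    rcases Nat.lt_or_ge (i.toNat + 1) (pvMaxL (i :: rest)) with h | h
    · exact Prod.Lex.left _ _ h
    · have he : i.toNat + 1 = pvMaxL (i :: rest) := by omega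
      rw [← he]
      exact Prod.Lex.right _ (Prod.Lex.left _ _ (by omega))
  · have h1 : pvMaxL rest ≤ pvMaxL (i :: rest) := by
      simp only [pvMaxL, List.foldr]; omega
    rcases Nat.lt_or_ge (pvMaxL rest) (pvMaxL (i :: rest)) with h | h
    · exact Prod.Lex.left _ _ h
    · have he : pvMaxL rest = pvMaxL (i :: rest) := by omega
      rw [← he]
      exact Prod.Lex.right _ (Prod.Lex.right _ (by simp))

  -- ways(t, r, j): memoized count of strictly decreasing sequences of j values
  -- from 1..t-1 summing to r; candidates above r are pruned by min(t, r+1)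
  def bfs_altWays (t r j : Int) (memo : PySem.Dict (Int × Int × Int) Int) :
      Int × PySem.Dict (Int × Int × Int) Int :=
    if r = 0 ∧ j = 0 then (1, memo)
    else if j ≤ 0 ∨ r < 0 then (0, memo)
    else
      match PySem.Dict.get? memo (t, r, j) with
      | some v => (v, memo)
      | none =>
        let p := bfs_altSum r j (PySem.List.pyRange 1 (min t (r + 1)) 1) memo
        (p.1, PySem.Dict.insert p.2 (t, r, j) p.1)
  termination_by (t.toNat + 1, 0, 0)
  decreasing_by
  · have h1 : pvMaxL (PySem.List.pyRange 1 (min t (r + 1)) 1) ≤ t.toNat := by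
      apply pvMaxL_le
      intro i hi
      have := (PySem.List.mem_pyRange_one).mp hi
      omega
    exact Prod.Lex.left _ _ (by omega)
end

def bfs_alt (x : Int) (n : Int) (k : Int) : Int :=
  PySem.Int.mod (bfs_altWays x (n - x) (k - 1) PySem.Dict.empty).1 1000000007

-- ===== PRECONDITION & SPEC =====
def Spec_bfs (x : Int) (n : Int) (k : Int) (out : Int) : Prop := out = bfs_alt x n k
instance (x : Int) (n : Int) (k : Int) (out : Int) : Decidable (Spec_bfs x n k out) := by unfold Spec_bfs; infer_instance

-- ===== CLAIM (what is proved, stated in full; the proofs are below) =====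
def Claim_equal_bfs : Prop := ∀ (x : Int) (n : Int) (k : Int), Dom_bfs x n k → Spec_bfs x n k (bfs x n k)

-- ===== LEMMAS AND PROOFS =====

-- A-side recursive node count: F t r j = contribution of a queue state with
-- first component t, remaining sum r = n - location, remaining jumps j = k - jump
def pvF (t r j : Int) : Int :=
  if r = 0 ∧ j = 0 then 1
  else if 0 < j then
    (((PySem.List.pyRange 1 t 1).attach).map
      (fun i => if i.1 ≤ r then pvF i.1 (r - i.1) (j - 1) else 0)).sum
  else 0
  termination_by t.toNat
  decreasing_by
    have := (PySem.List.mem_pyRange_one).mp i.2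
    omega

lemma pvF_unfold (t r j : Int) :
    pvF t r j = if r = 0 ∧ j = 0 then 1
      else if 0 < j then
        ((PySem.List.pyRange 1 t 1).map
          (fun i => if i ≤ r then pvF i (r - i) (j - 1) else 0)).sum
      else 0 := by
  rw [pvF]
  congr 1
  congr 1
  rw [List.attach_map_val (f := fun i => if i ≤ r then pvF i (r - i) (j - 1) else 0)]

lemma pvF_j_nonpos (t r j : Int) (hj : j ≤ 0) (h : ¬(r = 0 ∧ j = 0)) : pvF t r j = 0 := by
  rw [pvF_unfold, if_neg h, if_neg (by omega)]

lemma pvF_neg_r (t r j : Int) (hr : r < 0) : pvF t r j = 0 := by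
  rw [pvF_unfold, if_neg (by omega)]
  split
  · apply List.sum_eq_zero
    intro y hy
    rcases List.mem_map.mp hy with ⟨i, hi, rfl⟩
    have := (PySem.List.mem_pyRange_one).mp hi
    rw [if_neg (by omega)]
  · rfl

lemma pvF_cap_sum (t r j : Int) (hr : 0 ≤ r) (hj : 0 < j) (h : ¬(r = 0 ∧ j = 0)) :
    pvF t r j
      = ((PySem.List.pyRange 1 (min t (r + 1)) 1).map (fun i => pvF i (r - i) (j - 1))).sum := by
  rw [pvF_unfold, if_neg h, if_pos hj]
  by_cases htr : t ≤ r + 1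
  · rw [min_eq_left htr]
    apply congrArg List.sum
    apply List.map_congr_left
    intro i hi
    have := (PySem.List.mem_pyRange_one).mp hi
    rw [if_pos (by omega)]
  · push_neg at htr
    rw [min_eq_right (by omega)]
    rw [PySem.List.pyRange_one_append 1 (r + 1) t (by omega) (by omega),
      List.map_append, List.sum_append]
    have h2 : ((PySem.List.pyRange (r + 1) t 1).map
        (fun i => if i ≤ r then pvF i (r - i) (j - 1) else 0)).sum = 0 := by
      apply List.sum_eq_zero
      intro y hy
      rcases List.mem_map.mp hy with ⟨i, hi, rfl⟩
      have := (PySem.List.mem_pyRange_one).mp hi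
      rw [if_neg (by omega)]
    rw [h2, add_zero]
    apply congrArg List.sum
    apply List.map_congr_left
    intro i hi
    have := (PySem.List.mem_pyRange_one).mp hi
    rw [if_pos (by omega)]

lemma pvSumMapIte (l : List Int) (p : Int → Prop) [DecidablePred p] (g : Int → Int) :
    (l.map (fun i => if p i then g i else 0)).sum
      = ((l.filter (fun i => decide (p i))).map g).sum := by
  induction l with
  | nil => simp
  | cons a l ih =>
    by_cases h : p a <;> simp [List.filter_cons, h, ih]

lemma pvLoop_eq (n k : Int) : ∀ (que : List (Int × Int × Int)) (cnt : Int),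
    bfsLoop n k que cnt
      = cnt + (que.map (fun e => pvF e.1 (n - e.2.1) (k - e.2.2))).sum := by
  intro que cnt
  fun_induction bfsLoop n k que cnt with
  | case1 cnt => simp
  | case2 tx location jump que cnt h ih =>
    rw [ih]
    have h1 : pvF tx (n - location) (k - jump) = 1 := by
      rw [pvF_unfold, if_pos (by omega)]
    simp [h1]
    ring
  | case3 tx location jump que cnt h hj ih =>
    simp only [dite_eq_ite] at ih
    rw [ih]
    rw [PySem.List.foldl_append_ite (p := fun i => location + i ≤ n)
        (f := fun i => (i, location + i, jump + 1))]
    simp only [List.map_cons, List.sum_cons, List.map_append, List.sum_append, List.map_map]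
    have hF : pvF tx (n - location) (k - jump)
        = (((PySem.List.pyRange 1 tx 1).filter (fun i => decide (location + i ≤ n))).map
            (fun i => pvF i (n - location - i) (k - jump - 1))).sum := by
      rw [pvF_unfold, if_neg (by omega), if_pos (by omega)]
      have : ∀ i ∈ PySem.List.pyRange 1 tx 1,
          (if i ≤ n - location then pvF i (n - location - i) (k - jump - 1) else 0)
            = (if location + i ≤ n then pvF i (n - location - i) (k - jump - 1) else 0) := by
        intro i _
        congr 1
        simp
        constructor <;> intro <;> omega
      rw [List.map_congr_left this, pvSumMapIte]
    rw [hF]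
    have hcomp : ((fun e : ℤ × ℤ × ℤ => pvF e.1 (n - e.2.1) (k - e.2.2))
          ∘ fun i : ℤ => (i, location + i, jump + 1))
        = fun i : ℤ => pvF i (n - location - i) (k - jump - 1) := by
      funext i
      simp only [Function.comp]
      congr 1 <;> ring
    rw [hcomp]
    ring
  | case4 tx location jump que cnt h hj ih =>
    rw [ih]
    simp only [List.map_cons, List.sum_cons]
    rw [pvF_j_nonpos tx (n - location) (k - jump) (by omega) (by omega)]
    ring

lemma pvBfs_eq_F (x n k : Int) :
    bfs x n k = PySem.Int.mod (pvF x (n - x) (k - 1)) 1000000007 := by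
  rw [bfs, pvLoop_eq]
  simp

-- every memo entry stores the exact node count
def pvGood (memo : PySem.Dict (Int × Int × Int) Int) : Prop :=
  ∀ (key : Int × Int × Int) (v : Int),
    PySem.Dict.get? memo key = some v → v = pvF key.1 key.2.1 key.2.2

lemma pvGood_empty : pvGood PySem.Dict.empty := by
  intro key v h
  rw [PySem.Dict.get?_empty] at h
  exact absurd h (by simp)

lemma pvGood_insert (memo : PySem.Dict (Int × Int × Int) Int) (key : Int × Int × Int)
    (v : Int) (hm : pvGood memo) (hv : v = pvF key.1 key.2.1 key.2.2) :
    pvGood (PySem.Dict.insert memo key v) := by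
  intro key' v' h
  rw [PySem.Dict.get?_insert] at h
  by_cases hk : key' = key
  · rw [if_pos hk] at h
    cases h
    rw [hk]
    exact hv
  · rw [if_neg hk] at h
    exact hm key' v' h

lemma pvAltWays_good : ∀ (T : ℕ) (t r j : Int) (memo : PySem.Dict (Int × Int × Int) Int),
    t.toNat ≤ T → pvGood memo →
    (bfs_altWays t r j memo).1 = pvF t r j ∧ pvGood (bfs_altWays t r j memo).2 := by
  intro T
  induction T with
  | zero =>
    intro t r j memo ht hg
    have ht0 : t ≤ 0 := by omega
    rw [bfs_altWays]
    by_cases h1 : r = 0 ∧ j = 0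
    · rw [if_pos h1]
      exact ⟨by rw [pvF_unfold, if_pos h1], hg⟩
    · rw [if_neg h1]
      by_cases h2 : j ≤ 0 ∨ r < 0
      · rw [if_pos h2]
        rcases h2 with h2 | h2
        · exact ⟨(pvF_j_nonpos t r j h2 h1).symm, hg⟩
        · exact ⟨(pvF_neg_r t r j h2).symm, hg⟩
      · rw [if_neg h2]
        push_neg at h2
        cases hget : PySem.Dict.get? memo (t, r, j) with
        | some v =>
          simp only
          exact ⟨(hg (t, r, j) v hget), hg⟩
        | none =>
          simp only
          have hnil : PySem.List.pyRange 1 (min t (r + 1)) 1 = [] :=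
            PySem.List.pyRange_one_eq_nil (by omega)
          rw [hnil, bfs_altSum]
          have hF : pvF t r j = 0 := by
            rw [pvF_cap_sum t r j (by omega) (by omega) h1, hnil]
            rfl
          refine ⟨hF.symm, ?_⟩
          exact pvGood_insert memo (t, r, j) 0 hg (by rw [hF])
  | succ T ih =>
    intro t r j memo ht hg
    rw [bfs_altWays]
    by_cases h1 : r = 0 ∧ j = 0
    · rw [if_pos h1]
      exact ⟨by rw [pvF_unfold, if_pos h1], hg⟩
    · rw [if_neg h1]
      by_cases h2 : j ≤ 0 ∨ r < 0
      · rw [if_pos h2]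
        rcases h2 with h2 | h2
        · exact ⟨(pvF_j_nonpos t r j h2 h1).symm, hg⟩
        · exact ⟨(pvF_neg_r t r j h2).symm, hg⟩
      · rw [if_neg h2]
        push_neg at h2
        cases hget : PySem.Dict.get? memo (t, r, j) with
        | some v =>
          simp only
          exact ⟨(hg (t, r, j) v hget), hg⟩
        | none =>
          simp only
          have hsum : ∀ (l : List Int), (∀ i ∈ l, 1 ≤ i ∧ i < t) →
              ∀ (m : PySem.Dict (Int × Int × Int) Int), pvGood m →
              (bfs_altSum r j l m).1 = (l.map (fun i => pvF i (r - i) (j - 1))).sum ∧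
                pvGood (bfs_altSum r j l m).2 := by
            intro l
            induction l with
            | nil =>
              intro _ m hm
              rw [bfs_altSum]
              exact ⟨rfl, hm⟩
            | cons i rest ihl =>
              intro hb m hm
              have hib := hb i (by simp)
              have h1 := ih i (r - i) (j - 1) m (by omega) hm
              have h2 := ihl (fun i' hi' => hb i' (by simp [hi'])) _ h1.2
              rw [bfs_altSum]
              simp only [List.map_cons, List.sum_cons]
              exact ⟨by rw [h1.1, h2.1], h2.2⟩
          have hb : ∀ i ∈ PySem.List.pyRange 1 (min t (r + 1)) 1, 1 ≤ i ∧ i < t := by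
            intro i hi
            have := (PySem.List.mem_pyRange_one).mp hi
            omega
          have hres := hsum _ hb memo hg
          have hF : pvF t r j
              = ((PySem.List.pyRange 1 (min t (r + 1)) 1).map
                  (fun i => pvF i (r - i) (j - 1))).sum :=
            pvF_cap_sum t r j (by omega) (by omega) h1
          refine ⟨by rw [hres.1, ← hF], ?_⟩
          exact pvGood_insert _ (t, r, j) _ hres.2 (by rw [hres.1, ← hF])

lemma pvAlt_eq_F (x n k : Int) :
    bfs_alt x n k = PySem.Int.mod (pvF x (n - x) (k - 1)) 1000000007 := by
  rw [bfs_alt]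
  rw [(pvAltWays_good x.toNat x (n - x) (k - 1) PySem.Dict.empty (le_refl _) pvGood_empty).1]

-- ===== VERDICT (by name: the statement is the Claim_ definition above) =====
theorem bfs_spec : Claim_equal_bfs := by
  unfold Claim_equal_bfs
  intro x n k _
  unfold Spec_bfs
  rw [pvBfs_eq_F, pvAlt_eq_F]
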